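-- pv_equiv track=rewrite | github.com/DiemDam03/CE222_Mid_Term_Proj- | final.py | extract_sum_of_products
-- ===== SOURCE A (Python) =====
-- from collections import namedtuple
-- from itertools import product
--
-- Node = namedtuple("Node", ["type", "value", "children"])
--
-- def tokenize(expr):
--     tokens = []
--     i = 0
--     while i < len(expr):
--         c = expr[i]
--         if c.isalpha():
--             tokens.append(c)
--         elif c in "+.()":
--             tokens.append(c)
--         i += 1
--     return tokens
--
-- def parse_expr(tokens):
--     def parse_term():
--         if tokens and tokens[0] == "(":
--             tokens.pop(0)
--             node = parse_or()
--             tokens.pop(0)  # remove ")"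
--             return node
--         else:
--             return Node("VAR", tokens.pop(0), [])
--
--     def parse_and():
--         nodes = [parse_term()]
--         while tokens and tokens[0] == ".":
--             tokens.pop(0)
--             nodes.append(parse_term())
--         if len(nodes) == 1:
--             return nodes[0]
--         return Node("AND", None, nodes)
--
--     def parse_or():
--         nodes = [parse_and()]
--         while tokens and tokens[0] == "+":
--             tokens.pop(0)
--             nodes.append(parse_and())
--         if len(nodes) == 1:
--             return nodes[0]
--         return Node("OR", None, nodes)
--
--     return parse_or()
--
-- def extract_sum_of_products(expr):
--     tokens = tokenize(expr)
--     tree = parse_expr(tokens)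
--
--     def expand(node):
--         if node.type == "VAR":
--             return [[node.value]]
--         elif node.type == "AND":
--             expanded = [expand(child) for child in node.children]
--
--             combined = []
--             for prod_terms in product(*expanded):
--                 flat = []
--                 for group in prod_terms:
--                     flat.extend(group)
--                 combined.append(flat)
--             return combined
--         elif node.type == "OR":
--
--             result = []
--             for child in node.children:
--                 result.extend(expand(child))
--             return result
--         else:
--             return []
--
--     sop_terms = expand(tree)
--
--     unique_terms = set([".".join(sorted(term)) for term in sop_terms])
--     return sorted(unique_terms)
-- ===== SOURCE B (Python) =====
-- def extract_sum_of_products(expr):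
--     # Single recursive-descent pass that yields sum-of-products term lists
--     # directly (no AST, no separate expand traversal).
--     tokens = []
--     i = 0
--     while i < len(expr):
--         c = expr[i]
--         if c.isalpha():
--             tokens.append(c)
--         elif c in "+.()":
--             tokens.append(c)
--         i += 1
--
--     def parse_term():
--         if tokens and tokens[0] == "(":
--             tokens.pop(0)
--             terms = parse_or()
--             tokens.pop(0)  # remove ")"
--             return terms
--         return [[tokens.pop(0)]]
--
--     def parse_and():
--         terms = parse_term()
--         while tokens and tokens[0] == ".":
--             tokens.pop(0)
--             nxt = parse_term()
--             terms = [t + u for t in terms for u in nxt]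
--         return terms
--
--     def parse_or():
--         terms = parse_and()
--         while tokens and tokens[0] == "+":
--             tokens.pop(0)
--             terms = terms + parse_and()
--         return terms
--
--     sop_terms = parse_or()
--     unique_terms = set([".".join(sorted(term)) for term in sop_terms])
--     return sorted(unique_terms)
-- ===== Notes on version B (the rewrite author's own statement) =====
-- stated objective: simpler
-- what changed: Replaced the Node-AST-building parser plus the separate recursive expand() traversal with a single recursive-descent pass whose parse functions return sum-of-products term lists directly (AND recombines via a product comprehension, OR concatenates), keeping the tokenizer and final set/sort step; no namedtuple and no second traversal.
import Mathlib
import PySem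

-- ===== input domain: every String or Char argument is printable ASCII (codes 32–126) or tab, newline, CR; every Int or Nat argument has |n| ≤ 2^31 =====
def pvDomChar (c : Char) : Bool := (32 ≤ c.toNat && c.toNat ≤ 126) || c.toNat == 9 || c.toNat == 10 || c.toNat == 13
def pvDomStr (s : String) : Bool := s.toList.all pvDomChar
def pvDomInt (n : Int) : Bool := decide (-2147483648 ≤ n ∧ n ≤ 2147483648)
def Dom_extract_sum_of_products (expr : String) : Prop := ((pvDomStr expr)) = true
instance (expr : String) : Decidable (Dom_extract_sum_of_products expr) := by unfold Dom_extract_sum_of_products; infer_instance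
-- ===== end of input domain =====

-- B fuses A's AST-building parser and its separate expand() traversal into one
-- recursive-descent pass that returns sum-of-products term lists directly (objective: simpler).


-- ===== PORT A =====
-- tokenize: keeps alphabetic chars and "+.()" (shared verbatim by both Pythons)
def pvTokenize : List Char → List Char
  | [] => []
  | c :: rest =>
    if c.isAlpha then c :: pvTokenize rest
    else if c = '+' || c = '.' || c = '(' || c = ')' then c :: pvTokenize rest
    else pvTokenize rest

-- the Node namedtuple (VAR/AND/OR with a children list; mutual pair, no nested inductive)
mutual
inductive PvNode where
  | var : Char → PvNode
  | andN : PvNodeList → PvNode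
  | orN : PvNodeList → PvNode
inductive PvNodeList where
  | nil : PvNodeList
  | cons : PvNode → PvNodeList → PvNodeList
end

def pvOfList : List PvNode → PvNodeList
  | [] => .nil
  | n :: ns => .cons n (pvOfList ns)

-- parse_expr's nested parse_term/parse_and/parse_or; fuel only makes the mutual
-- recursion total (none = IndexError from tokens.pop(0); 4*len+4 is always enough)
mutual
def pvParseTermA : Nat → List Char → Option (PvNode × List Char)
  | 0, _ => none
  | f + 1, tokens =>
    match tokens with
    | [] => none                                  -- tokens.pop(0) on empty: IndexError
    | c :: rest =>
      if c = '(' then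
        match pvParseOrA f rest with
        | none => none
        | some (n, r) =>
          match r with
          | [] => none                            -- pop of ")" on empty: IndexError
          | _ :: r' => some (n, r')               -- remove ")" (unconditionally)
      else some (.var c, rest)

def pvParseAndLoopA : Nat → List PvNode → List Char → Option (List PvNode × List Char)
  | 0, _, _ => none
  | f + 1, ns, tokens =>
    match tokens with
    | c :: rest =>
      if c = '.' then
        match pvParseTermA f rest with
        | none => none
        | some (n, r) => pvParseAndLoopA f (ns ++ [n]) r
      else some (ns, c :: rest)
    | [] => some (ns, [])

def pvParseAndA : Nat → List Char → Option (PvNode × List Char)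
  | 0, _ => none
  | f + 1, tokens =>
    match pvParseTermA f tokens with
    | none => none
    | some (n, r) =>
      match pvParseAndLoopA f [n] r with
      | none => none
      | some (ns, r') =>
        match ns with
        | [n'] => some (n', r')
        | _ => some (.andN (pvOfList ns), r')

def pvParseOrLoopA : Nat → List PvNode → List Char → Option (List PvNode × List Char)
  | 0, _, _ => none
  | f + 1, ns, tokens =>
    match tokens with
    | c :: rest =>
      if c = '+' then
        match pvParseAndA f rest with
        | none => none
        | some (n, r) => pvParseOrLoopA f (ns ++ [n]) r
      else some (ns, c :: rest)
    | [] => some (ns, [])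

def pvParseOrA : Nat → List Char → Option (PvNode × List Char)
  | 0, _ => none
  | f + 1, tokens =>
    match pvParseAndA f tokens with
    | none => none
    | some (n, r) =>
      match pvParseOrLoopA f [n] r with
      | none => none
      | some (ns, r') =>
        match ns with
        | [n'] => some (n', r')
        | _ => some (.orN (pvOfList ns), r')
end

-- itertools.product over a list of lists (first factor varies slowest)
def pvCartProd {α : Type} : List (List α) → List (List α)
  | [] => [[]]
  | l :: ls => l.flatMap (fun x => (pvCartProd ls).map (fun t => x :: t))

-- expand(node): VAR → [[v]]; AND → flattened product of children; OR → concatenation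
mutual
def pvExpandA : PvNode → List (List Char)
  | .var c => [[c]]
  | .andN children => (pvCartProd (pvExpandListA children)).map List.flatten
  | .orN children => (pvExpandListA children).flatten
def pvExpandListA : PvNodeList → List (List (List Char))
  | .nil => []
  | .cons n ns => pvExpandA n :: pvExpandListA ns
end

-- '.'-join of a list of (single-char) variable names
def pvJoinDot : List Char → List Char
  | [] => []
  | c :: rest => c :: rest.flatMap (fun d => ['.', d])

-- sorted(set('.'.join(sorted(term)) for term in sop_terms)); sorting the 1-char
-- variable strings is sorting their chars by code point (shared verbatim by both Pythons)
def pvFinish (sop_terms : List (List Char)) : List String :=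
  PySem.List.sorted
    (PySem.Set.ofList (sop_terms.map (fun term => String.ofList (pvJoinDot (PySem.List.sorted term (fun c => c) false)))))
    (fun s => s) false

def extract_sum_of_products (expr : String) : List String :=
  let tokens := pvTokenize expr.toList
  match pvParseOrA (4 * tokens.length + 4) tokens with
  | none => []                                    -- Python raises here; outside Pre_
  | some (tree, _) => pvFinish (pvExpandA tree)

-- ===== PORT B =====
-- [t + u for t in a for u in b] — the AND recombination step of Source B
def pvCombine (a b : List (List Char)) : List (List Char) :=
  a.flatMap (fun t => b.map (fun u => t ++ u))

mutual
def pvParseTermB : Nat → List Char → Option (List (List Char) × List Char)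
  | 0, _ => none
  | f + 1, tokens =>
    match tokens with
    | [] => none
    | c :: rest =>
      if c = '(' then
        match pvParseOrB f rest with
        | none => none
        | some (ts, r) =>
          match r with
          | [] => none
          | _ :: r' => some (ts, r')
      else some ([[c]], rest)

def pvParseAndLoopB : Nat → List (List Char) → List Char → Option (List (List Char) × List Char)
  | 0, _, _ => none
  | f + 1, terms, tokens =>
    match tokens with
    | c :: rest =>
      if c = '.' then
        match pvParseTermB f rest with
        | none => none
        | some (nxt, r) => pvParseAndLoopB f (pvCombine terms nxt) r
      else some (terms, c :: rest)
    | [] => some (terms, [])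

def pvParseAndB : Nat → List Char → Option (List (List Char) × List Char)
  | 0, _ => none
  | f + 1, tokens =>
    match pvParseTermB f tokens with
    | none => none
    | some (ts, r) => pvParseAndLoopB f ts r

def pvParseOrLoopB : Nat → List (List Char) → List Char → Option (List (List Char) × List Char)
  | 0, _, _ => none
  | f + 1, terms, tokens =>
    match tokens with
    | c :: rest =>
      if c = '+' then
        match pvParseAndB f rest with
        | none => none
        | some (ts, r) => pvParseOrLoopB f (terms ++ ts) r
      else some (terms, c :: rest)
    | [] => some (terms, [])

def pvParseOrB : Nat → List Char → Option (List (List Char) × List Char)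
  | 0, _ => none
  | f + 1, tokens =>
    match pvParseAndB f tokens with
    | none => none
    | some (ts, r) => pvParseOrLoopB f ts r
end

def extract_sum_of_products_alt (expr : String) : List String :=
  let tokens := pvTokenize expr.toList
  match pvParseOrB (4 * tokens.length + 4) tokens with
  | none => []
  | some (sop_terms, _) => pvFinish sop_terms

-- ===== PRECONDITION & SPEC =====
-- pvOk mode depth toks: mode true = a factor is expected, false = an operator is
-- expected with `depth` open groups; Python's parser raises IndexError exactly when
-- this counter automaton runs out of tokens while one more is still needed.
def pvOk : Bool → Nat → List Char → Bool
  | true, _, [] => false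
  | true, d, c :: rest => if c = '(' then pvOk true (d + 1) rest else pvOk false d rest
  | false, d, [] => d == 0
  | false, d, c :: rest =>
    if c = '.' || c = '+' then pvOk true d rest
    else match d with
      | 0 => true
      | d' + 1 => pvOk false d' rest

-- Pre_ excludes exactly the inputs on which A's tokens.pop(0) raises IndexError
def Pre_extract_sum_of_products (expr : String) : Prop :=
  pvOk true 0 (expr.toList.filter (fun c => c.isAlpha || c = '+' || c = '.' || c = '(' || c = ')')) = true
instance (expr : String) : Decidable (Pre_extract_sum_of_products expr) := by
  unfold Pre_extract_sum_of_products; infer_instance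

def pvWitness_extract_sum_of_products : String := "(a+b).c"

def Spec_extract_sum_of_products (expr : String) (out : List String) : Prop := out = extract_sum_of_products_alt expr
instance (expr : String) (out : List String) : Decidable (Spec_extract_sum_of_products expr out) := by unfold Spec_extract_sum_of_products; infer_instance

-- ===== CLAIM (what is proved, stated in full; the proofs are below) =====
def Claim_equal_extract_sum_of_products : Prop := ∀ (expr : String), Dom_extract_sum_of_products expr → Pre_extract_sum_of_products expr → Spec_extract_sum_of_products expr (extract_sum_of_products expr)

-- ===== LEMMAS AND PROOFS =====

theorem pvCombine_assoc (a b c : List (List Char)) :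
    pvCombine (pvCombine a b) c = pvCombine a (pvCombine b c) := by
  simp [pvCombine, List.flatMap_assoc, List.flatMap_map, List.map_flatMap, List.map_map,
    Function.comp_def, List.append_assoc]

-- pvF: what expand() makes of an AND node with these children expansions
def pvF (es : List (List (List Char))) : List (List Char) :=
  (pvCartProd es).map List.flatten

theorem pvF_single (e : List (List Char)) : pvF [e] = e := by
  simp [pvF, pvCartProd, List.map_flatMap]

theorem pvF_cons (e : List (List Char)) (es : List (List (List Char))) :
    pvF (e :: es) = pvCombine e (pvF es) := by
  simp [pvF, pvCartProd, pvCombine, List.map_flatMap, List.map_map, Function.comp_def]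

theorem pvF_snoc (es : List (List (List Char))) (e : List (List Char)) :
    pvF (es ++ [e]) = pvCombine (pvF es) e := by
  induction es with
  | nil => rw [List.nil_append, pvF_single]; simp [pvF, pvCartProd, pvCombine]
  | cons x es ih => rw [List.cons_append, pvF_cons, ih, pvF_cons, pvCombine_assoc]

theorem pvExpandListA_ofList (ns : List PvNode) :
    pvExpandListA (pvOfList ns) = ns.map pvExpandA := by
  induction ns with
  | nil => rfl
  | cons n ns ih => simp [pvOfList, pvExpandListA, ih]

-- the main simulation: B's parser returns exactly expand() of A's parse tree,
-- with the same leftover tokens (and fails exactly where A fails), at every fuel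
theorem pvAgree (f : Nat) :
    (∀ t, pvParseTermB f t = (pvParseTermA f t).map (fun p => (pvExpandA p.1, p.2))) ∧
    (∀ ns t, pvParseAndLoopB f (pvF (ns.map pvExpandA)) t =
      (pvParseAndLoopA f ns t).map (fun p => (pvF (p.1.map pvExpandA), p.2))) ∧
    (∀ t, pvParseAndB f t = (pvParseAndA f t).map (fun p => (pvExpandA p.1, p.2))) ∧
    (∀ ns t, pvParseOrLoopB f ((ns.map pvExpandA).flatten) t =
      (pvParseOrLoopA f ns t).map (fun p => ((p.1.map pvExpandA).flatten, p.2))) ∧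
    (∀ t, pvParseOrB f t = (pvParseOrA f t).map (fun p => (pvExpandA p.1, p.2))) := by
  induction f with
  | zero => exact ⟨fun _ => rfl, fun _ _ => rfl, fun _ => rfl, fun _ _ => rfl, fun _ => rfl⟩
  | succ f ih =>
    obtain ⟨ihT, ihAL, ihA, ihOL, ihO⟩ := ih
    have hT : ∀ t, pvParseTermB (f + 1) t =
        (pvParseTermA (f + 1) t).map (fun p => (pvExpandA p.1, p.2)) := by
      intro t
      match t with
      | [] => rfl
      | c :: rest =>
        simp only [pvParseTermA, pvParseTermB]
        by_cases hc : c = '('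
        · rw [if_pos hc, if_pos hc, ihO rest]
          cases h : pvParseOrA f rest with
          | none => rfl
          | some p =>
            obtain ⟨n, r⟩ := p
            cases r <;> rfl
        · rw [if_neg hc, if_neg hc]; rfl
    have hAL : ∀ ns t, pvParseAndLoopB (f + 1) (pvF (ns.map pvExpandA)) t =
        (pvParseAndLoopA (f + 1) ns t).map (fun p => (pvF (p.1.map pvExpandA), p.2)) := by
      intro ns t
      match t with
      | [] => rfl
      | c :: rest =>
        simp only [pvParseAndLoopA, pvParseAndLoopB]
        by_cases hc : c = '.'
        · rw [if_pos hc, if_pos hc, ihT rest]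
          cases h : pvParseTermA f rest with
          | none => rfl
          | some p =>
            obtain ⟨n, r⟩ := p
            simp only [Option.map_some]
            rw [show pvCombine (pvF (ns.map pvExpandA)) (pvExpandA n)
                  = pvF ((ns ++ [n]).map pvExpandA) by
                rw [List.map_append, List.map_singleton, pvF_snoc],
              ihAL]
        · rw [if_neg hc, if_neg hc]; rfl
    have hA : ∀ t, pvParseAndB (f + 1) t =
        (pvParseAndA (f + 1) t).map (fun p => (pvExpandA p.1, p.2)) := by
      intro t
      simp only [pvParseAndA, pvParseAndB]
      rw [ihT t]
      cases h : pvParseTermA f t with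
      | none => rfl
      | some p =>
        obtain ⟨n, r⟩ := p
        simp only [Option.map_some]
        rw [show pvExpandA n = pvF ([n].map pvExpandA) by
            rw [List.map_singleton, pvF_single], ihAL]
        cases h2 : pvParseAndLoopA f [n] r with
        | none => rfl
        | some q =>
          obtain ⟨ns, r'⟩ := q
          match ns with
          | [] => rfl
          | [n'] => simp [pvF_single]
          | a :: b :: l => simp [pvExpandA, pvF, pvExpandListA_ofList]
    have hOL : ∀ ns t, pvParseOrLoopB (f + 1) ((ns.map pvExpandA).flatten) t =
        (pvParseOrLoopA (f + 1) ns t).map (fun p => ((p.1.map pvExpandA).flatten, p.2)) := by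
      intro ns t
      match t with
      | [] => rfl
      | c :: rest =>
        simp only [pvParseOrLoopA, pvParseOrLoopB]
        by_cases hc : c = '+'
        · rw [if_pos hc, if_pos hc, ihA rest]
          cases h : pvParseAndA f rest with
          | none => rfl
          | some p =>
            obtain ⟨n, r⟩ := p
            simp only [Option.map_some]
            rw [show (ns.map pvExpandA).flatten ++ pvExpandA n
                  = ((ns ++ [n]).map pvExpandA).flatten by simp, ihOL]
        · rw [if_neg hc, if_neg hc]; rfl
    have hO : ∀ t, pvParseOrB (f + 1) t =
        (pvParseOrA (f + 1) t).map (fun p => (pvExpandA p.1, p.2)) := by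
      intro t
      simp only [pvParseOrA, pvParseOrB]
      rw [ihA t]
      cases h : pvParseAndA f t with
      | none => rfl
      | some p =>
        obtain ⟨n, r⟩ := p
        simp only [Option.map_some]
        rw [show pvExpandA n = ([n].map pvExpandA).flatten by simp, ihOL]
        cases h2 : pvParseOrLoopA f [n] r with
        | none => rfl
        | some q =>
          obtain ⟨ns, r'⟩ := q
          match ns with
          | [] => rfl
          | [n'] => simp
          | a :: b :: l => simp [pvExpandA, pvExpandListA_ofList]
    exact ⟨hT, hAL, hA, hOL, hO⟩

-- the two entry points agree at every fuel on every token list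
theorem pvTopEq (fuel : Nat) (toks : List Char) :
    (match pvParseOrA fuel toks with
     | none => []
     | some (tree, _) => pvFinish (pvExpandA tree))
    = (match pvParseOrB fuel toks with
       | none => []
       | some (sop_terms, _) => pvFinish sop_terms) := by
  rw [(pvAgree fuel).2.2.2.2]
  cases pvParseOrA fuel toks with
  | none => rfl
  | some p => rfl


-- ===== VERDICT (by name: the statement is the Claim_ definition above) =====
theorem extract_sum_of_products_spec : Claim_equal_extract_sum_of_products := by
  intro expr _ _
  unfold Spec_extract_sum_of_products extract_sum_of_products extract_sum_of_products_alt
  exact pvTopEq _ _
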